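-- pv_equiv track=rewrite | github.com/dbalatoni13/nfsmw | tools/dwarf_batch.py | count_lines_for_opcodes
-- ===== SOURCE A (Python) =====
-- from typing import Any, Dict, List, Sequence, Tuple
--
-- def count_lines_for_opcodes(opcodes: Sequence[Tuple[str, int, int, int, int]]) -> Dict[str, int]:
--     matching = 0
--     original_only = 0
--     rebuilt_only = 0
--     changed_groups = 0
--     for tag, i1, i2, j1, j2 in opcodes:
--         if tag == "equal":
--             matching += i2 - i1
--             continue
--         changed_groups += 1
--         if tag in ("replace", "delete"):
--             original_only += i2 - i1
--         if tag in ("replace", "insert"):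
--             rebuilt_only += j2 - j1
--     return {
--         "matching_lines": matching,
--         "original_only_lines": original_only,
--         "rebuilt_only_lines": rebuilt_only,
--         "changed_groups": changed_groups,
--     }
-- ===== SOURCE B (Python) =====
-- def count_lines_for_opcodes(opcodes):
--     return {
--         "matching_lines": sum(i2 - i1 for tag, i1, i2, _, _ in opcodes if tag == "equal"),
--         "original_only_lines": sum(i2 - i1 for tag, i1, i2, _, _ in opcodes if tag in ("replace", "delete")),
--         "rebuilt_only_lines": sum(j2 - j1 for tag, _, _, j1, j2 in opcodes if tag in ("replace", "insert")),
--         "changed_groups": sum(1 for tag, *_ in opcodes if tag != "equal"),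
--     }
-- ===== Notes on version B (the rewrite author's own statement) =====
-- stated objective: simpler
-- what changed: Replaces the single fused accumulating loop over four counters with four independent filtered sum comprehensions, one per output field.
import Mathlib
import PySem

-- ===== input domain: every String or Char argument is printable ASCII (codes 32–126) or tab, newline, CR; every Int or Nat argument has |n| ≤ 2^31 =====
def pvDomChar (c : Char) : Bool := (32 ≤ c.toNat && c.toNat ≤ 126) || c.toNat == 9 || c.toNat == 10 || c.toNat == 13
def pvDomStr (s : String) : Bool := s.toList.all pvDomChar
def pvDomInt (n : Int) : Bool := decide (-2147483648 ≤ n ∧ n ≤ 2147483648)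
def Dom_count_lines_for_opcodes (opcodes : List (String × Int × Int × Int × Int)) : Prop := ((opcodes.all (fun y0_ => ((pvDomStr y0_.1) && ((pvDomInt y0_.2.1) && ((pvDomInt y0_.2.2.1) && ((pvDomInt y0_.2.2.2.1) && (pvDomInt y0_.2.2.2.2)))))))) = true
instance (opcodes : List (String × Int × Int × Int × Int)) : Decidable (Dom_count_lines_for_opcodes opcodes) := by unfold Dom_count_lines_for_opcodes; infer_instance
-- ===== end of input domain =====

-- ===== PORT A =====
def clfoStep (st : Int × Int × Int × Int) (op : String × Int × Int × Int × Int) : Int × Int × Int × Int :=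
  let (matching, original_only, rebuilt_only, changed_groups) := st
  let (tag, i1, i2, j1, j2) := op
  if tag == "equal" then
    (matching + (i2 - i1), original_only, rebuilt_only, changed_groups)
  else
    let changed_groups := changed_groups + 1
    let original_only := if tag == "replace" || tag == "delete" then original_only + (i2 - i1) else original_only
    let rebuilt_only := if tag == "replace" || tag == "insert" then rebuilt_only + (j2 - j1) else rebuilt_only
    (matching, original_only, rebuilt_only, changed_groups)

def count_lines_for_opcodes (opcodes : List (String × Int × Int × Int × Int)) : List (String × Int) :=
  let st := opcodes.foldl clfoStep (0, 0, 0, 0)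
  [("matching_lines", st.1), ("original_only_lines", st.2.1),
   ("rebuilt_only_lines", st.2.2.1), ("changed_groups", st.2.2.2)]

-- ===== PORT B =====
def count_lines_for_opcodes_alt (opcodes : List (String × Int × Int × Int × Int)) : List (String × Int) :=
  [("matching_lines",
      ((opcodes.filter (fun op => op.1 == "equal")).map (fun op => op.2.2.1 - op.2.1)).sum),
   ("original_only_lines",
      ((opcodes.filter (fun op => op.1 == "replace" || op.1 == "delete")).map (fun op => op.2.2.1 - op.2.1)).sum),
   ("rebuilt_only_lines",
      ((opcodes.filter (fun op => op.1 == "replace" || op.1 == "insert")).map (fun op => op.2.2.2.2 - op.2.2.2.1)).sum),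
   ("changed_groups",
      ((opcodes.filter (fun op => op.1 != "equal")).map (fun _ => (1 : Int))).sum)]

-- ===== PRECONDITION & SPEC =====
def Spec_count_lines_for_opcodes (opcodes : List (String × Int × Int × Int × Int)) (out : List (String × Int)) : Prop := out = count_lines_for_opcodes_alt opcodes
instance (opcodes : List (String × Int × Int × Int × Int)) (out : List (String × Int)) : Decidable (Spec_count_lines_for_opcodes opcodes out) := by unfold Spec_count_lines_for_opcodes; infer_instance

-- ===== CLAIM (what is proved, stated in full; the proofs are below) =====
def Claim_equal_count_lines_for_opcodes : Prop := ∀ (opcodes : List (String × Int × Int × Int × Int)), Dom_count_lines_for_opcodes opcodes → Spec_count_lines_for_opcodes opcodes (count_lines_for_opcodes opcodes)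

-- ===== LEMMAS AND PROOFS =====

-- ===== VERDICT (by name: the statement is the Claim_ definition above) =====
theorem clfo_fold_char (opcodes : List (String × Int × Int × Int × Int))
    (m o r c : Int) :
    opcodes.foldl clfoStep (m, o, r, c) =
      (m + ((opcodes.filter (fun op => op.1 == "equal")).map (fun op => op.2.2.1 - op.2.1)).sum,
       o + ((opcodes.filter (fun op => op.1 == "replace" || op.1 == "delete")).map (fun op => op.2.2.1 - op.2.1)).sum,
       r + ((opcodes.filter (fun op => op.1 == "replace" || op.1 == "insert")).map (fun op => op.2.2.2.2 - op.2.2.2.1)).sum,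
       c + ((opcodes.filter (fun op => op.1 != "equal")).map (fun _ => (1 : Int))).sum) := by
  induction opcodes generalizing m o r c with
  | nil => simp
  | cons hd tl ih =>
    obtain ⟨tag, i1, i2, j1, j2⟩ := hd
    by_cases heq : tag = "equal"
    · subst heq
      simp [clfoStep, ih]
      ring
    · have hne : (tag == "equal") = false := by simp [heq]
      simp only [List.foldl_cons, clfoStep, hne, Bool.false_eq_true, if_false, List.filter_cons]
      rw [ih]
      by_cases hr : tag = "replace" <;> by_cases hd : tag = "delete" <;> by_cases hi : tag = "insert" <;>
        simp_all <;> ring_nf <;> simp [add_comm]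

theorem count_lines_for_opcodes_spec : Claim_equal_count_lines_for_opcodes := by
  intro opcodes _
  unfold Spec_count_lines_for_opcodes count_lines_for_opcodes count_lines_for_opcodes_alt
  simp [clfo_fold_char]
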